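-- pv_equiv track=rewrite | github.com/travisCxy/deblur | word/converter/doc_utils.py | strip_overlap_char
-- ===== SOURCE A (Python) =====
-- def strip_overlap_char(text, char, num):
--     new_text = ''
--     char_s = ''
--     f = False
--     for uu in text:
--         if uu!=char and not f:
--             new_text+=uu
--         elif uu!=char and f:
--             f = False
--             if len(char_s) >= num:
--                 new_text+=char*num
--             else:
--                 new_text+=char_s
--             char_s = ''
--             new_text += uu
--         elif not f:
--             char_s += uu
--             f = True
--         else:
--             char_s += uu
--     if char_s!='':
--         if len(char_s) >= num:
--             new_text += char * num
--         else:
--             new_text += char_s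
--     return new_text
-- ===== SOURCE B (Python) =====
-- def strip_overlap_char(text, char, num):
--     parts = []
--     i = 0
--     n = len(text)
--     while i < n:
--         j = i + 1
--         while j < n and text[j] == text[i]:
--             j += 1
--         run = text[i:j]
--         if run[0] == char and j - i >= num:
--             parts.append(char * num)
--         else:
--             parts.append(run)
--         i = j
--     return ''.join(parts)
-- ===== Notes on version B (the rewrite author's own statement) =====
-- stated objective: alternative
-- what changed: Replaced A's per-character flag/char_s state machine by a two-pointer scan that peels one maximal run of equal characters at a time and emits each run's piece directly, joined at the end.
import Mathlib
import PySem

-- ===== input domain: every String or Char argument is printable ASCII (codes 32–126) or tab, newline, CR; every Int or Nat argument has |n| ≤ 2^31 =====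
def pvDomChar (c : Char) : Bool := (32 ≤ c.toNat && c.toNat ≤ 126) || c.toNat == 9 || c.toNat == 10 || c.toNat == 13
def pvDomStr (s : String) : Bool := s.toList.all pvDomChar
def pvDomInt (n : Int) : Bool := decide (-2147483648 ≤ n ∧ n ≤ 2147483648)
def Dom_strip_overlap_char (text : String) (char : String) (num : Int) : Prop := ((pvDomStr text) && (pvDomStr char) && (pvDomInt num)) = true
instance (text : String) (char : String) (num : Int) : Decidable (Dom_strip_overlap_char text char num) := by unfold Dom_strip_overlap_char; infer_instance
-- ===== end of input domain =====

-- B replaces A's per-character flag/state machine by a two-pointer scan over maximal runs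
-- (objective: alternative decomposition, same asymptotic cost).

-- ===== PORT A =====
-- Python's `char * num` (empty for num ≤ 0)
def pvRep (s : List Char) (n : Int) : List Char := (List.replicate n.toNat s).flatten

-- `if len(char_s) >= num: char*num else: char_s`
def pvFlushA (char : List Char) (num : Int) (cs : List Char) : List Char :=
  if (cs.length : Int) ≥ num then pvRep char num else cs

-- one iteration of A's for-loop; state = (new_text, char_s, f); `uu != char` is `[uu] ≠ char`
def pvStepA (char : List Char) (num : Int) (st : List Char × List Char × Bool) (uu : Char) :
    List Char × List Char × Bool :=
  let (acc, cs, f) := st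
  if [uu] ≠ char ∧ f = false then (acc ++ [uu], cs, f)
  else if [uu] ≠ char ∧ f = true then (acc ++ pvFlushA char num cs ++ [uu], [], false)
  else if f = false then (acc, cs ++ [uu], true)
  else (acc, cs ++ [uu], f)

def strip_overlap_char (text : String) (char : String) (num : Int) : String :=
  let st := text.toList.foldl (pvStepA char.toList num) ([], [], false)
  String.mk (st.1 ++ (if st.2.1 ≠ [] then pvFlushA char.toList num st.2.1 else []))

-- ===== PORT B =====
-- B's outer while loop: peel one maximal run (the inner `while j < n and text[j] == text[i]`
-- is the takeWhile/dropWhile split of the tail) and emit its piece.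
def pvGoB (char : List Char) (num : Int) : List Char → List Char
  | [] => []
  | c :: rest =>
    let t := rest.takeWhile (fun x => x = c)
    (if [c] = char ∧ ((t.length : Int) + 1 ≥ num) then pvRep char num else c :: t)
      ++ pvGoB char num (rest.dropWhile (fun x => x = c))
termination_by l => l.length
decreasing_by
  simpa using Nat.lt_succ_of_le (List.length_dropWhile_le _ _)

def strip_overlap_char_alt (text : String) (char : String) (num : Int) : String :=
  String.mk (pvGoB char.toList num text.toList)

-- ===== PRECONDITION & SPEC =====
def Spec_strip_overlap_char (text : String) (char : String) (num : Int) (out : String) : Prop := out = strip_overlap_char_alt text char num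
instance (text : String) (char : String) (num : Int) (out : String) : Decidable (Spec_strip_overlap_char text char num out) := by unfold Spec_strip_overlap_char; infer_instance

-- ===== CLAIM (what is proved, stated in full; the proofs are below) =====
def Claim_equal_strip_overlap_char : Prop := ∀ (text : String) (char : String) (num : Int), Dom_strip_overlap_char text char num → Spec_strip_overlap_char text char num (strip_overlap_char text char num)

-- ===== LEMMAS AND PROOFS =====

-- A's whole computation on a character list
def pvA (char : List Char) (num : Int) (l : List Char) : List Char :=
  let st := l.foldl (pvStepA char num) ([], [], false)
  st.1 ++ (if st.2.1 ≠ [] then pvFlushA char num st.2.1 else [])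

lemma stepA_prefix (char : List Char) (num : Int) (a acc cs : List Char) (f : Bool) (u : Char) :
    pvStepA char num (a ++ acc, cs, f) u =
      (a ++ (pvStepA char num (acc, cs, f) u).1, (pvStepA char num (acc, cs, f) u).2) := by
  simp only [pvStepA]
  split_ifs <;> simp

lemma foldA_prefix (char : List Char) (num : Int) (l : List Char) :
    ∀ (a acc cs : List Char) (f : Bool),
      l.foldl (pvStepA char num) (a ++ acc, cs, f) =
        (a ++ (l.foldl (pvStepA char num) (acc, cs, f)).1,
          (l.foldl (pvStepA char num) (acc, cs, f)).2) := by
  induction l with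
  | nil => intro a acc cs f; simp
  | cons u l ih =>
    intro a acc cs f
    simp only [List.foldl_cons, stepA_prefix]
    rcases h : pvStepA char num (acc, cs, f) u with ⟨acc', cs', f'⟩
    simpa using ih a acc' cs' f'

-- fold over a run of non-matching characters with empty pending state
lemma foldA_run_ne (char : List Char) (num : Int) (c : Char) :
    ∀ (t : List Char), (∀ x ∈ t, x = c) → ¬ ([c] = char) →
      ∀ a : List Char, t.foldl (pvStepA char num) (a, [], false) = (a ++ t, [], false) := by
  intro t
  induction t with
  | nil => intro _ _ a; simp
  | cons x t ih =>
    intro hall hc a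
    have hx : x = c := hall x (by simp)
    have h1 : pvStepA char num (a, [], false) x = (a ++ [x], [], false) := by
      simp [pvStepA, hx, hc]
    rw [List.foldl_cons, h1,
      ih (fun y hy => hall y (by simp [hy])) hc (a ++ [x])]
    simp

-- fold over a run of matching characters, flag already set
lemma foldA_run_eq (char : List Char) (num : Int) (c : Char) (hc : [c] = char) :
    ∀ (t : List Char), (∀ x ∈ t, x = c) →
      ∀ (a cs : List Char), t.foldl (pvStepA char num) (a, cs, true) = (a, cs ++ t, true) := by
  intro t
  induction t with
  | nil => intro _ a cs; simp
  | cons x t ih =>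
    intro hall a cs
    have hx : x = c := hall x (by simp)
    have h1 : pvStepA char num (a, cs, true) x = (a, cs ++ [x], true) := by
      simp [pvStepA, hx, ← hc]
    rw [List.foldl_cons, h1, ih (fun y hy => hall y (by simp [hy])) a (cs ++ [x])]
    simp

lemma dropWhile_head_false {α : Type} (p : α → Bool) :
    ∀ (l : List α) (e : α) (d : List α), l.dropWhile p = e :: d → p e = false := by
  intro l
  induction l with
  | nil => intro e d h; simp [List.dropWhile] at h
  | cons x l ih =>
    intro e d h
    by_cases hx : p x
    · exact ih e d (by simpa [List.dropWhile, hx] using h)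
    · rw [List.dropWhile_cons_of_neg hx] at h
      rw [← List.cons.injEq x l e d |>.mp h |>.1]
      simpa using hx

-- the main equivalence, by strong induction on the length of the list
lemma pvA_eq_goB (char : List Char) (num : Int) :
    ∀ l : List Char, pvA char num l = pvGoB char num l := by
  intro l
  induction hn : l.length using Nat.strong_induction_on generalizing l with
  | _ n ih =>
  cases l with
  | nil => simp [pvA, pvGoB]
  | cons c rest =>
    subst hn
    have hall : ∀ x ∈ rest.takeWhile (fun x => x = c), x = c := by
      intro x hx
      simpa using List.mem_takeWhile_imp hx
    have hsplit : rest = rest.takeWhile (fun x => x = c) ++ rest.dropWhile (fun x => x = c) :=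
      (List.takeWhile_append_dropWhile).symm
    have hdl : (rest.dropWhile (fun x => x = c)).length ≤ rest.length :=
      List.length_dropWhile_le _ _
    by_cases hc : [c] = char
    · -- matching run: A accumulates it in char_s, B emits its piece
      have hflush : pvFlushA char num (c :: rest.takeWhile (fun x => x = c)) =
          (if [c] = char ∧ (((rest.takeWhile (fun x => x = c)).length : Int) + 1 ≥ num)
            then pvRep char num else c :: rest.takeWhile (fun x => x = c)) := by
        have hiff : (((c :: rest.takeWhile (fun x => x = c)).length : Int) ≥ num) ↔
            (((rest.takeWhile (fun x => x = c)).length : Int) + 1 ≥ num) := by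
          simp only [List.length_cons]
          push_cast
          omega
        by_cases hnum : (((rest.takeWhile (fun x => x = c)).length : Int) + 1 ≥ num)
        · rw [pvFlushA, if_pos (hiff.mpr hnum), if_pos ⟨hc, hnum⟩]
        · rw [pvFlushA, if_neg (fun h => hnum (hiff.mp h)), if_neg (fun h => hnum h.2)]
      have h1 : pvStepA char num ([], [], false) c = ([], [c], true) := by
        simp [pvStepA, hc]
      have h2 : (c :: rest).foldl (pvStepA char num) ([], [], false) =
          (rest.dropWhile (fun x => x = c)).foldl (pvStepA char num)
            ([], c :: rest.takeWhile (fun x => x = c), true) := by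
        conv_lhs => rw [List.foldl_cons, h1, hsplit]
        rw [List.foldl_append, foldA_run_eq char num c hc _ hall]
        simp
      cases hd : rest.dropWhile (fun x => x = c) with
      | nil =>
        rw [pvA, pvGoB]
        simp only [h2, hd, List.foldl_nil, pvGoB, List.append_nil]
        rw [hflush]
        simp
      | cons e d' =>
        have he : ¬ (e = c) := by simpa using dropWhile_head_false _ rest e d' hd
        have hec : ¬ ([e] = char) := by
          rw [← hc]; simpa using he
        have h3 : pvStepA char num ([], c :: rest.takeWhile (fun x => x = c), true) e =
            (pvFlushA char num (c :: rest.takeWhile (fun x => x = c)) ++ [e], [], false) := by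
          simp [pvStepA, hec]
        have hlen' : (e :: d').length < (c :: rest).length := by
          have h5 := hd ▸ hdl
          simp at h5 ⊢
          omega
        have ihe : pvA char num (e :: d') = pvGoB char num (e :: d') :=
          ih _ hlen' _ rfl
        have hA : pvA char num (e :: d') =
            [e] ++ ((d'.foldl (pvStepA char num) ([], [], false)).1 ++
              (if (d'.foldl (pvStepA char num) ([], [], false)).2.1 ≠ [] then
                pvFlushA char num (d'.foldl (pvStepA char num) ([], [], false)).2.1 else [])) := by
          rw [pvA]
          have h4 : pvStepA char num ([], [], false) e = ([e], [], false) := by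
            simp [pvStepA, hec]
          have h6 := foldA_prefix char num d' [e] [] [] false
          simp only [List.append_nil] at h6
          simp [List.foldl_cons, h4, h6]
        rw [pvA]
        conv_rhs => rw [pvGoB]
        simp only [h2, hd, List.foldl_cons, h3]
        have hpre := foldA_prefix char num d'
          (pvFlushA char num (c :: rest.takeWhile (fun x => x = c)) ++ [e]) [] [] false
        simp only [List.append_nil] at hpre
        rw [hpre, ← ihe, hA, hflush]
        simp
    · -- non-matching run: both sides copy it unchanged
      have hlen : (rest.dropWhile (fun x => x = c)).length < (c :: rest).length := by
        simp
        omega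
      have ihd : pvA char num (rest.dropWhile (fun x => x = c)) =
          pvGoB char num (rest.dropWhile (fun x => x = c)) := ih _ hlen _ rfl
      have h1 : pvStepA char num ([], [], false) c = ([c], [], false) := by
        simp [pvStepA, hc]
      have h2 : (c :: rest).foldl (pvStepA char num) ([], [], false) =
          (rest.dropWhile (fun x => x = c)).foldl (pvStepA char num)
            (c :: rest.takeWhile (fun x => x = c), [], false) := by
        conv_lhs => rw [List.foldl_cons, h1, hsplit]
        rw [List.foldl_append, foldA_run_ne char num c _ hall hc [c]]
        simp
      rw [pvA]
      conv_rhs => rw [pvGoB, if_neg (fun h => hc h.1)]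
      simp only [h2]
      have hpre := foldA_prefix char num (rest.dropWhile (fun x => x = c))
        (c :: rest.takeWhile (fun x => x = c)) [] [] false
      simp only [List.append_nil] at hpre
      rw [hpre, ← ihd, pvA]
      simp

-- ===== VERDICT (by name: the statement is the Claim_ definition above) =====
theorem strip_overlap_char_spec : Claim_equal_strip_overlap_char := by
  intro text char num _
  unfold Spec_strip_overlap_char strip_overlap_char strip_overlap_char_alt
  exact congrArg String.mk (pvA_eq_goB char.toList num text.toList)
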